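-- pv_equiv track=rewrite | github.com/d-consoli/scikit-map | skmap/modeler.py | _get_out_files_depths
-- ===== SOURCE A (Python) =====
-- def _get_out_files_depths(out_files_prefix, out_files_suffix, tile_id, depths, n_depths, years, n_years, n_stats):
--     assert(len(out_files_prefix) == len(out_files_suffix))
--     assert(len(out_files_prefix) == n_stats)
--     assert(len(depths) >= n_depths)
--     assert(len(years) >= n_years)
--     out_files = []
--     for i in range(n_depths):
--         for k in range(n_stats):
--             for j in range(n_years):
--                 if n_years < len(years):
--                     y1 = years[j]
--                     y2 = years[j + len(years) - n_years]
--                     if n_depths < len(depths):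
--                         d1 = depths[i]
--                         d2 = depths[i + len(depths) - n_depths]
--                         file = f'{out_files_prefix[k]}_b{d1}cm..{d2}cm_{y1}0101_{y2}1231_tile.{tile_id}_{out_files_suffix[k]}'
--                     else:
--                         d1 = depths[i]
--                         file = f'{out_files_prefix[k]}_b{d1}cm_{y1}0101_{y2}1231_tile.{tile_id}_{out_files_suffix[k]}'
--                 else:
--                     y1 = years[j]
--                     if n_depths < len(depths):
--                         d1 = depths[i]
--                         d2 = depths[i + len(depths) - n_depths]
--                         file = f'{out_files_prefix[k]}_b{d1}cm..{d2}cm_{y1}0101_{y1}1231_tile.{tile_id}_{out_files_suffix[k]}'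
--                     else:
--                         d1 = depths[i]
--                         file = f'{out_files_prefix[k]}_b{d1}cm_{y1}0101_{y1}1231_tile.{tile_id}_{out_files_suffix[k]}'
--                 out_files.append(file)
--     return out_files
-- ===== SOURCE B (Python) =====
-- def _get_out_files_depths(out_files_prefix, out_files_suffix, tile_id, depths, n_depths, years, n_years, n_stats):
--     assert(len(out_files_prefix) == len(out_files_suffix))
--     assert(len(out_files_prefix) == n_stats)
--     assert(len(depths) >= n_depths)
--     assert(len(years) >= n_years)
--     if n_depths < len(depths):
--         dtok = [f'b{depths[i]}cm..{depths[i + len(depths) - n_depths]}cm' for i in range(n_depths)]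
--     else:
--         dtok = [f'b{depths[i]}cm' for i in range(n_depths)]
--     if n_years < len(years):
--         ytok = [f'{years[j]}0101_{years[j + len(years) - n_years]}1231' for j in range(n_years)]
--     else:
--         ytok = [f'{years[j]}0101_{years[j]}1231' for j in range(n_years)]
--     out_files = []
--     for n in range(len(dtok) * n_stats * len(ytok)):
--         i, r = divmod(n, n_stats * len(ytok))
--         k, j = divmod(r, len(ytok))
--         out_files.append(f'{out_files_prefix[k]}_{dtok[i]}_{ytok[j]}_tile.{tile_id}_{out_files_suffix[k]}')
--     return out_files
-- ===== Notes on version B (the rewrite author's own statement) =====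
-- stated objective: alternative
-- what changed: B replaces A's triple nested loop (with both format branches re-decided in the innermost body) by two precomputed token tables plus a single flat loop over the product count whose index is decoded into (depth, stat, year) coordinates with divmod.
import Mathlib
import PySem

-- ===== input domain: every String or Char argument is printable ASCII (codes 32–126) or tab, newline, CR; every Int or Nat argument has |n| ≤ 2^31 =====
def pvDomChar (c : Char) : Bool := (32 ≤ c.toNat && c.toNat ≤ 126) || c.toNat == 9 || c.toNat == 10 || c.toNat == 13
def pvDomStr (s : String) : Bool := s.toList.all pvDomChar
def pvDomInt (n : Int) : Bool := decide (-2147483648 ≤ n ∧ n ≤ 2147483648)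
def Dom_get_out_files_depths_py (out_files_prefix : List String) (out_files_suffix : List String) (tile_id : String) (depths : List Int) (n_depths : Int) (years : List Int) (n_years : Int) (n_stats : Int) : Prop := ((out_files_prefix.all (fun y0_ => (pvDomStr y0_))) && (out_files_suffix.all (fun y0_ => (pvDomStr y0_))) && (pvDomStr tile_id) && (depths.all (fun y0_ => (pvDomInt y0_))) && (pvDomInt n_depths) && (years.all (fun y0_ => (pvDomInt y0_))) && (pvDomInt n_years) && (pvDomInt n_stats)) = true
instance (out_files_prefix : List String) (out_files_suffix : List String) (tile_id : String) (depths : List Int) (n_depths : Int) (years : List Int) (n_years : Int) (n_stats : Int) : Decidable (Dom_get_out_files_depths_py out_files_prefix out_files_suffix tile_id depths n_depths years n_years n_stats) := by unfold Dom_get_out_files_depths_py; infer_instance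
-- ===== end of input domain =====

-- B precomputes the depth/year token tables once and emits the output with a single flat loop
-- over the product count, decoding each index into (depth, stat, year) with divmod; same cost,
-- a different decomposition than A's triple nested loop.

-- ===== PORT A =====
-- Port of A: triple nested index loop; format branches re-decided in the innermost body.
def get_out_files_depths_py (out_files_prefix : List String) (out_files_suffix : List String) (tile_id : String) (depths : List Int) (n_depths : Int) (years : List Int) (n_years : Int) (n_stats : Int) : List String :=
  (PySem.List.pyRange 0 n_depths 1).foldl (fun acc i =>
    (PySem.List.pyRange 0 n_stats 1).foldl (fun acc k =>
      (PySem.List.pyRange 0 n_years 1).foldl (fun acc j =>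
        acc ++ [if n_years < (years.length : Int) then
            (if n_depths < (depths.length : Int) then
              PySem.List.pyGetD out_files_prefix k "" ++ "_b" ++ PySem.Int.toStr (PySem.List.pyGetD depths i 0) ++ "cm.." ++ PySem.Int.toStr (PySem.List.pyGetD depths (i + (depths.length : Int) - n_depths) 0) ++ "cm_" ++ PySem.Int.toStr (PySem.List.pyGetD years j 0) ++ "0101_" ++ PySem.Int.toStr (PySem.List.pyGetD years (j + (years.length : Int) - n_years) 0) ++ "1231_tile." ++ tile_id ++ "_" ++ PySem.List.pyGetD out_files_suffix k ""
            else
              PySem.List.pyGetD out_files_prefix k "" ++ "_b" ++ PySem.Int.toStr (PySem.List.pyGetD depths i 0) ++ "cm_" ++ PySem.Int.toStr (PySem.List.pyGetD years j 0) ++ "0101_" ++ PySem.Int.toStr (PySem.List.pyGetD years (j + (years.length : Int) - n_years) 0) ++ "1231_tile." ++ tile_id ++ "_" ++ PySem.List.pyGetD out_files_suffix k "")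
          else
            (if n_depths < (depths.length : Int) then
              PySem.List.pyGetD out_files_prefix k "" ++ "_b" ++ PySem.Int.toStr (PySem.List.pyGetD depths i 0) ++ "cm.." ++ PySem.Int.toStr (PySem.List.pyGetD depths (i + (depths.length : Int) - n_depths) 0) ++ "cm_" ++ PySem.Int.toStr (PySem.List.pyGetD years j 0) ++ "0101_" ++ PySem.Int.toStr (PySem.List.pyGetD years j 0) ++ "1231_tile." ++ tile_id ++ "_" ++ PySem.List.pyGetD out_files_suffix k ""
            else
              PySem.List.pyGetD out_files_prefix k "" ++ "_b" ++ PySem.Int.toStr (PySem.List.pyGetD depths i 0) ++ "cm_" ++ PySem.Int.toStr (PySem.List.pyGetD years j 0) ++ "0101_" ++ PySem.Int.toStr (PySem.List.pyGetD years j 0) ++ "1231_tile." ++ tile_id ++ "_" ++ PySem.List.pyGetD out_files_suffix k "")]) acc) acc) []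

-- ===== PORT B =====
-- Port of B: token tables built once, then ONE flat loop over len(dtok)*n_stats*len(ytok)
-- whose index n is decoded into coordinates (i, k, j) with divmod.
def get_out_files_depths_py_alt (out_files_prefix : List String) (out_files_suffix : List String) (tile_id : String) (depths : List Int) (n_depths : Int) (years : List Int) (n_years : Int) (n_stats : Int) : List String :=
  let dtok : List String :=
    if n_depths < (depths.length : Int) then
      (PySem.List.pyRange 0 n_depths 1).map (fun i => "b" ++ PySem.Int.toStr (PySem.List.pyGetD depths i 0) ++ "cm.." ++ PySem.Int.toStr (PySem.List.pyGetD depths (i + (depths.length : Int) - n_depths) 0) ++ "cm")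
    else
      (PySem.List.pyRange 0 n_depths 1).map (fun i => "b" ++ PySem.Int.toStr (PySem.List.pyGetD depths i 0) ++ "cm")
  let ytok : List String :=
    if n_years < (years.length : Int) then
      (PySem.List.pyRange 0 n_years 1).map (fun j => PySem.Int.toStr (PySem.List.pyGetD years j 0) ++ "0101_" ++ PySem.Int.toStr (PySem.List.pyGetD years (j + (years.length : Int) - n_years) 0) ++ "1231")
    else
      (PySem.List.pyRange 0 n_years 1).map (fun j => PySem.Int.toStr (PySem.List.pyGetD years j 0) ++ "0101_" ++ PySem.Int.toStr (PySem.List.pyGetD years j 0) ++ "1231")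
  (PySem.List.pyRange 0 ((dtok.length : Int) * n_stats * (ytok.length : Int)) 1).foldl (fun acc n =>
    let i := PySem.Int.floordiv n (n_stats * (ytok.length : Int))
    let r := PySem.Int.mod n (n_stats * (ytok.length : Int))
    let k := PySem.Int.floordiv r (ytok.length : Int)
    let j := PySem.Int.mod r (ytok.length : Int)
    acc ++ [PySem.List.pyGetD out_files_prefix k "" ++ "_" ++ PySem.List.pyGetD dtok i "" ++ "_" ++ PySem.List.pyGetD ytok j "" ++ "_tile." ++ tile_id ++ "_" ++ PySem.List.pyGetD out_files_suffix k ""]) []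

-- ===== PRECONDITION & SPEC =====
-- Pre_ holds exactly when A's four asserts pass (A raises AssertionError otherwise);
-- all indexing inside the loops is then in range.
def Pre_get_out_files_depths_py (out_files_prefix : List String) (out_files_suffix : List String) (tile_id : String) (depths : List Int) (n_depths : Int) (years : List Int) (n_years : Int) (n_stats : Int) : Prop :=
  out_files_prefix.length = out_files_suffix.length ∧
  (out_files_prefix.length : Int) = n_stats ∧
  n_depths ≤ (depths.length : Int) ∧
  n_years ≤ (years.length : Int)
instance (out_files_prefix : List String) (out_files_suffix : List String) (tile_id : String) (depths : List Int) (n_depths : Int) (years : List Int) (n_years : Int) (n_stats : Int) : Decidable (Pre_get_out_files_depths_py out_files_prefix out_files_suffix tile_id depths n_depths years n_years n_stats) := by unfold Pre_get_out_files_depths_py; infer_instance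

def pvWitness_get_out_files_depths_py : List String × List String × String × List Int × Int × List Int × Int × Int :=
  (["mean"], ["p50.tif"], "017E", [0, 10], 1, [2000], 1, 1)

def Spec_get_out_files_depths_py (out_files_prefix : List String) (out_files_suffix : List String) (tile_id : String) (depths : List Int) (n_depths : Int) (years : List Int) (n_years : Int) (n_stats : Int) (out : List String) : Prop := out = get_out_files_depths_py_alt out_files_prefix out_files_suffix tile_id depths n_depths years n_years n_stats
instance (out_files_prefix : List String) (out_files_suffix : List String) (tile_id : String) (depths : List Int) (n_depths : Int) (years : List Int) (n_years : Int) (n_stats : Int) (out : List String) : Decidable (Spec_get_out_files_depths_py out_files_prefix out_files_suffix tile_id depths n_depths years n_years n_stats out) := by unfold Spec_get_out_files_depths_py; infer_instance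

-- ===== CLAIM (what is proved, stated in full; the proofs are below) =====
def Claim_equal_get_out_files_depths_py : Prop := ∀ (out_files_prefix : List String) (out_files_suffix : List String) (tile_id : String) (depths : List Int) (n_depths : Int) (years : List Int) (n_years : Int) (n_stats : Int), Dom_get_out_files_depths_py out_files_prefix out_files_suffix tile_id depths n_depths years n_years n_stats → Pre_get_out_files_depths_py out_files_prefix out_files_suffix tile_id depths n_depths years n_years n_stats → Spec_get_out_files_depths_py out_files_prefix out_files_suffix tile_id depths n_depths years n_years n_stats (get_out_files_depths_py out_files_prefix out_files_suffix tile_id depths n_depths years n_years n_stats)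

-- ===== LEMMAS AND PROOFS =====
-- splitting A's fused string literals at B's token boundaries
theorem pvSplit_b (x : String) : "_b" ++ x = "_" ++ ("b" ++ x) := by
  rw [← String.append_assoc, show ("_" : String) ++ "b" = "_b" from rfl]
theorem pvSplit_cm (x : String) : "cm_" ++ x = "cm" ++ ("_" ++ x) := by
  rw [← String.append_assoc, show ("cm" : String) ++ "_" = "cm_" from rfl]
theorem pvSplit_tile (x : String) : "1231_tile." ++ x = "1231" ++ ("_tile." ++ x) := by
  rw [← String.append_assoc, show ("1231" : String) ++ "_tile." = "1231_tile." from rfl]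

-- mapping a decoded flat index over range (a*b) = the nested product loop
theorem pvRangeMulDecode {β : Type} (f : Nat → Nat → β) (a b : Nat) :
    (List.range (a * b)).map (fun n => f (n / b) (n % b)) =
      (List.range a).flatMap (fun i => (List.range b).map (fun j => f i j)) := by
  induction a with
  | zero => simp
  | succ a ih =>
    rcases Nat.eq_zero_or_pos b with hb | hb
    · subst hb; simp
    · have : (a + 1) * b = a * b + b := by ring
      rw [this, List.range_add, List.map_append, ih, List.range_succ, List.flatMap_append]
      congr 1
      simp only [List.flatMap_cons, List.flatMap_nil, List.append_nil, List.map_map]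
      refine List.map_congr_left ?_
      intro t ht
      have htb : t < b := List.mem_range.mp ht
      have h1 : (a * b + t) / b = a := by
        rw [Nat.mul_comm a b, Nat.mul_add_div hb, Nat.div_eq_of_lt htb, Nat.add_zero]
      have h2 : (a * b + t) % b = t := by
        rw [Nat.mul_comm a b, Nat.mul_add_mod, Nat.mod_eq_of_lt htb]
      simp [h1, h2]

-- ===== VERDICT (by name: the statement is the Claim_ definition above) =====
theorem pvRangeMulDecode3 {β : Type} (f : Nat → Nat → Nat → β) (a s y : Nat) :
    (List.range (a * s * y)).map (fun n => f (n / (s * y)) (n % (s * y) / y) (n % (s * y) % y)) =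
      (List.range a).flatMap (fun i => (List.range s).flatMap (fun k => (List.range y).map (fun j => f i k j))) := by
  have h1 := pvRangeMulDecode (fun i r => f i (r / y) (r % y)) a (s * y)
  rw [mul_assoc, h1]
  refine List.flatMap_congr ?_
  intro i _
  exact pvRangeMulDecode (f i) s y

theorem get_out_files_depths_py_spec : Claim_equal_get_out_files_depths_py := by
  intro p s tile depths nd years ny ns _hdom hpre
  obtain ⟨hlen, hns, _hd, _hy⟩ := hpre
  subst hns
  unfold Spec_get_out_files_depths_py get_out_files_depths_py get_out_files_depths_py_alt
  by_cases hnd : nd < 0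
  · rw [PySem.List.pyRange_one_eq_nil (by omega : nd ≤ 0)]
    simp
  by_cases hny : ny < 0
  · simp [PySem.List.pyRange_one_eq_nil (by omega : ny ≤ (0:Int))]
  obtain ⟨a, rfl⟩ : ∃ a : Nat, nd = (a : Int) := ⟨nd.toNat, by omega⟩
  obtain ⟨y, rfl⟩ : ∃ y : Nat, ny = (y : Int) := ⟨ny.toNat, by omega⟩
  simp only [PySem.List.foldl_append_singleton_eq_map, PySem.List.foldl_append_eq_flatMap,
    List.nil_append]
  by_cases hdl : (a : Int) < (depths.length : Int) <;> by_cases hyl : (y : Int) < (years.length : Int) <;>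
    simp only [hdl, hyl, if_true, if_false] <;>
  · simp only [List.length_map, PySem.List.length_pyRange_one, Int.sub_zero, Int.toNat_natCast]
    rw [show ((a:Int) * (p.length:Int) * (y:Int)) = ((a * p.length * y : Nat) : Int) by push_cast; ring]
    simp only [PySem.List.pyRange_zero_natCast, List.flatMap_map, List.map_map, ← Nat.cast_mul,
      PySem.List.pyGetD_natCast]
    refine Eq.trans ((pvRangeMulDecode3 _ a p.length y).symm) ?_
    refine List.map_congr_left ?_
    intro n hn
    have h3 := List.mem_range.mp hn
    have hy0 : 0 < y := by
      rcases Nat.eq_zero_or_pos y with h | h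
      · rw [h, Nat.mul_zero] at h3; omega
      · exact h
    have hs0 : 0 < p.length := by
      rcases Nat.eq_zero_or_pos p.length with h | h
      · rw [h, Nat.mul_zero, Nat.zero_mul] at h3; omega
      · exact h
    have hm1 : n / (p.length * y) < a := by
      rw [Nat.div_lt_iff_lt_mul (Nat.mul_pos hs0 hy0)]
      rw [Nat.mul_assoc] at h3; exact h3
    have hm2 : n % (p.length * y) / y < p.length := by
      rw [Nat.div_lt_iff_lt_mul hy0]
      exact Nat.mod_lt _ (Nat.mul_pos hs0 hy0)
    have hm3 : n % (p.length * y) % y < y := Nat.mod_lt _ hy0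
    simp only [Function.comp, PySem.Int.floordiv_natCast, PySem.Int.mod_natCast,
      PySem.List.pyGetD_natCast]
    rw [PySem.List.getD_map_range _ _ _ _ hm1, PySem.List.getD_map_range _ _ _ _ hm3]
    simp only [Function.comp_apply, PySem.List.pyGetD_natCast, String.append_assoc, pvSplit_b, pvSplit_cm, pvSplit_tile]
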